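-- pv_equiv track=rewrite | github.com/lehmacdj/beets | beetsplug/vlcsafe.py | vlc_safe_template_func
-- ===== SOURCE A (Python) =====
-- def vlc_safe_template_func(text):
--     if not(text):
--         return u''
--     text_out = ''
--     for c in text:
--         if c == '#':
--             continue
--         elif c == '[':
--             text_out += '('
--         elif c == ']':
--             text_out += ')'
--         else:
--             text_out += c
--     return text_out
-- ===== SOURCE B (Python) =====
-- def vlc_safe_template_func(text):
--     if not text:
--         return u''
--     return text.replace('#', '').replace('[', '(').replace(']', ')')
-- ===== Notes on version B (the rewrite author's own statement) =====
-- stated objective: idiomatic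
-- what changed: Replaces the single per-character Python loop with branching and string accumulation by three chained full-string str.replace scans (disjoint trigger characters, so order is irrelevant); the C-level replace scans outrun the interpreted per-character loop.
import Mathlib
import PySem

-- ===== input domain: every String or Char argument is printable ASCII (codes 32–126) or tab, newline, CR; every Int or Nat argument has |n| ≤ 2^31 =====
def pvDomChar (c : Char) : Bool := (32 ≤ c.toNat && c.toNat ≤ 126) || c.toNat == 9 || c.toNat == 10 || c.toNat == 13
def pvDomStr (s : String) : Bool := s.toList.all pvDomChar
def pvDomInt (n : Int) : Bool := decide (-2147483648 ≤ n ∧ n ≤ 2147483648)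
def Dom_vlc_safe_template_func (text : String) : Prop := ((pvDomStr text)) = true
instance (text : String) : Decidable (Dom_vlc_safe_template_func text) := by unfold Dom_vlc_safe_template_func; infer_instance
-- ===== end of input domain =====

-- B replaces A's single per-character loop by three independent full-string replace scans; idiomatic, same complexity.

-- ===== PORT A =====
-- one pass over the characters, accumulating the output string (as a char list, turned back into a String at the end)
def vlc_safe_template_func (text : String) : String :=
  if text.toList = [] then ""
  else
    String.ofList (text.toList.foldl (fun acc c =>
      if c = '#' then acc
      else if c = '[' then acc ++ ['(']
      else if c = ']' then acc ++ [')']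
      else acc ++ [c]) [])

-- ===== PORT B =====
-- the same falsy guard, then three chained str.replace scans
def vlc_safe_template_func_alt (text : String) : String :=
  if text.toList = [] then ""
  else PySem.Str.replace (PySem.Str.replace (PySem.Str.replace text "#" "") "[" "(") "]" ")"

-- ===== PRECONDITION & SPEC =====
def Spec_vlc_safe_template_func (text : String) (out : String) : Prop := out = vlc_safe_template_func_alt text
instance (text : String) (out : String) : Decidable (Spec_vlc_safe_template_func text out) := by unfold Spec_vlc_safe_template_func; infer_instance

-- ===== CLAIM (what is proved, stated in full; the proofs are below) =====
def Claim_equal_vlc_safe_template_func : Prop := ∀ (text : String), Dom_vlc_safe_template_func text → Spec_vlc_safe_template_func text (vlc_safe_template_func text)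

-- ===== LEMMAS AND PROOFS =====

-- replace with a single-character needle is a flatMap over the characters
lemma replace_go_single (x : Char) (ys : List Char) :
    ∀ (s : List Char) (fuel : Nat) (acc : List Char), s.length ≤ fuel →
      PySem.Chars.replace.go [x] ys fuel s acc
        = acc.reverse ++ s.flatMap (fun c => if c = x then ys else [c]) := by
  intro s
  induction s with
  | nil =>
      intro fuel acc _
      cases fuel <;> simp [PySem.Chars.replace.go]
  | cons c t ih =>
      intro fuel acc hfuel
      cases fuel with
      | zero => simp at hfuel
      | succ f =>
        simp only [PySem.Chars.replace.go]
        by_cases hc : c = x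
        · subst hc
          simp [List.isPrefixOf, ih f (ys.reverse ++ acc) (by simpa using Nat.le_of_succ_le_succ (by simpa using hfuel))]
        · have hpre : List.isPrefixOf [x] (c :: t) = false := by
            simp [List.isPrefixOf]
            exact fun h => absurd h.symm hc
          simp [hpre, ih f (c :: acc) (by simpa using Nat.le_of_succ_le_succ (by simpa using hfuel)), hc]

lemma replace_single (s : List Char) (x : Char) (ys : List Char) :
    PySem.Chars.replace s [x] ys = s.flatMap (fun c => if c = x then ys else [c]) := by
  simp [PySem.Chars.replace, replace_go_single x ys s s.length [] (le_refl _)]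

-- A's loop is the same flatMap
lemma foldl_step_eq_flatMap (s : List Char) :
    ∀ acc : List Char,
      s.foldl (fun acc c =>
        if c = '#' then acc
        else if c = '[' then acc ++ ['(']
        else if c = ']' then acc ++ [')']
        else acc ++ [c]) acc
      = acc ++ s.flatMap (fun c =>
          if c = '#' then []
          else if c = '[' then ['(']
          else if c = ']' then [')']
          else [c]) := by
  induction s with
  | nil => intro acc; simp
  | cons c t ih =>
      intro acc
      simp only [List.foldl_cons, List.flatMap_cons, ih]
      split_ifs <;> simp

-- ===== VERDICT (by name: the statement is the Claim_ definition above) =====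
theorem vlc_safe_template_func_spec : Claim_equal_vlc_safe_template_func := by
  intro text _
  unfold Spec_vlc_safe_template_func vlc_safe_template_func vlc_safe_template_func_alt
  by_cases h : text.toList = []
  · simp [h]
  · simp only [h, if_false]
    simp only [PySem.Str.replace, String.toList_ofList, foldl_step_eq_flatMap, List.nil_append]
    congr 1
    rw [show ("#" : String).toList = ['#'] from rfl, show ("[" : String).toList = ['['] from rfl,
        show ("]" : String).toList = [']'] from rfl, show ("" : String).toList = [] from rfl,
        show ("(" : String).toList = ['('] from rfl, show (")" : String).toList = [')'] from rfl]
    rw [replace_single, replace_single, replace_single, List.flatMap_assoc, List.flatMap_assoc]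
    apply List.flatMap_congr
    intro c _
    by_cases h1 : c = '#' <;> by_cases h2 : c = '[' <;> by_cases h3 : c = ']' <;>
      simp_all
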